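-- pv_equiv track=rewrite | github.com/kayoung-dev/problem-solving | generator/level01/g171.py | get_ans_p171
-- ===== SOURCE A (Python) =====
-- def get_ans_p171(n):
--     if n <= 0: return 0
--     low, high = 0, 10**9
--     ans = 0
--     while low <= high:
--         mid = (low + high) // 2
--         if mid == 0:
--             low = 1
--             continue
--         # 등차수열의 합: S = k(3k - 1) // 2
--         total = mid * (3 * mid - 1) // 2
--         if total <= n:
--             ans = mid
--             low = mid + 1
--         else:
--             high = mid - 1
--     return ans
-- ===== SOURCE B (Python) =====
-- def get_ans_p171(n):
--     if n <= 0: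
--         return 0
--     k = 0
--     while (k + 1) * (3 * (k + 1) - 1) // 2 <= n:
--         k += 1
--     return k
-- ===== Notes on version B (the rewrite author's own statement) =====
-- stated objective: simpler
-- what changed: Replaced the binary search over [0, 10**9] (with its mid==0 special case and explicit ans bookkeeping) by a plain linear scan that increments k while the next pentagonal number still fits.
import Mathlib
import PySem

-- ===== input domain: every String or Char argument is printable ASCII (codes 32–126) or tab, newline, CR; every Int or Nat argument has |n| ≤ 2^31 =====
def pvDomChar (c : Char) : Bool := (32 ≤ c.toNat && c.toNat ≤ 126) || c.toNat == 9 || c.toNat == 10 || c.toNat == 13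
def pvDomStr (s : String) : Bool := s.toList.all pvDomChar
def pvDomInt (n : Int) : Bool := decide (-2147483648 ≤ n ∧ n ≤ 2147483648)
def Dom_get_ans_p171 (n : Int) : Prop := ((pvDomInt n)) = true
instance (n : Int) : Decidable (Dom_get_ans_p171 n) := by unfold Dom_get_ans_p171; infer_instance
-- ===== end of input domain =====

-- B replaces A's binary search (with its mid==0 special case and ans bookkeeping) by a
-- plain linear scan incrementing k while the next generalised-pentagonal value fits; simpler, not faster.

-- k*(3k-1) is always even, so Python's // 2 on it is exact (used by both ports' termination proofs and by the equivalence proof)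
theorem pent_even (k : Int) : 2 ∣ k * (3 * k - 1) := by
  rcases Int.even_or_odd k with ⟨m, hm⟩ | ⟨m, hm⟩
  · exact ⟨m * (3 * k - 1), by rw [hm]; ring⟩
  · exact ⟨k * (3 * m + 1), by rw [hm]; ring⟩

theorem pent_le_iff (k n : Int) :
    PySem.Int.floordiv (k * (3 * k - 1)) 2 ≤ n ↔ k * (3 * k - 1) ≤ 2 * n := by
  rw [PySem.Int.floordiv_eq_ediv_of_pos (by norm_num)]
  have h := pent_even k
  generalize k * (3 * k - 1) = p at *
  omega

-- ===== PORT A =====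
-- the while-loop of A: state (low, high, ans); mid is written out where A names it
def loopA171 (n low high ans : Int) : Int :=
  if low ≤ high then
    if PySem.Int.floordiv (low + high) 2 = 0 then
      loopA171 n 1 high ans
    else if PySem.Int.floordiv (PySem.Int.floordiv (low + high) 2 * (3 * PySem.Int.floordiv (low + high) 2 - 1)) 2 ≤ n then
      loopA171 n (PySem.Int.floordiv (low + high) 2 + 1) high (PySem.Int.floordiv (low + high) 2)
    else
      loopA171 n low (PySem.Int.floordiv (low + high) 2 - 1) ans
  else ans
termination_by (high - low + 1).toNat
decreasing_by
  · have h0 := (PySem.Int.floordiv_eq_iff_of_pos (a := low + high) (b := 2) (q := 0)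
      (by norm_num)).mp (by assumption)
    omega
  · have hb := PySem.Int.floordiv_two_mid_bounds (lo := low) (hi := high) (by assumption)
    omega
  · have hb := PySem.Int.floordiv_two_mid_bounds (lo := low) (hi := high) (by assumption)
    omega

def get_ans_p171 (n : Int) : Int :=
  if n ≤ 0 then 0 else loopA171 n 0 (10 ^ 9) 0

-- ===== PORT B =====
-- the while-loop of B: increment k while the next pentagonal value still fits
def loopB171 (n k : Int) : Int :=
  if PySem.Int.floordiv ((k + 1) * (3 * (k + 1) - 1)) 2 ≤ n then
    loopB171 n (k + 1)
  else k
termination_by (n - k).toNat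
decreasing_by
  have h := (pent_le_iff (k + 1) n).mp (by assumption)
  have hsq : 0 ≤ k * (k + 1) := by nlinarith [sq_nonneg (2 * k + 1)]
  have : k < n := by nlinarith
  omega

def get_ans_p171_alt (n : Int) : Int :=
  if n ≤ 0 then 0 else loopB171 n 0

-- ===== PRECONDITION & SPEC =====
def Spec_get_ans_p171 (n : Int) (out : Int) : Prop := out = get_ans_p171_alt n
instance (n : Int) (out : Int) : Decidable (Spec_get_ans_p171 n out) := by unfold Spec_get_ans_p171; infer_instance

-- ===== CLAIM (what is proved, stated in full; the proofs are below) =====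
def Claim_equal_get_ans_p171 : Prop := ∀ (n : Int), Dom_get_ans_p171 n → Spec_get_ans_p171 n (get_ans_p171 n)

-- ===== LEMMAS AND PROOFS =====

-- B's loop returns the largest k with k(3k-1)/2 ≤ n, characterised by the two pentagonal inequalities
theorem loopB_spec (n k : Int) :
    k * (3 * k - 1) ≤ 2 * n →
      k ≤ loopB171 n k ∧ loopB171 n k * (3 * loopB171 n k - 1) ≤ 2 * n ∧
        2 * n < (loopB171 n k + 1) * (3 * (loopB171 n k + 1) - 1) := by
  induction k using loopB171.induct n with
  | case1 k hcond ih =>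
    intro _
    have h1 := (pent_le_iff (k + 1) n).mp hcond
    rw [loopB171, if_pos hcond]
    have := ih h1
    exact ⟨by omega, this.2.1, this.2.2⟩
  | case2 k hcond =>
    intro hk
    rw [loopB171, if_neg hcond]
    exact ⟨le_refl k, hk, by have := (pent_le_iff (k + 1) n).not.mp hcond; omega⟩

-- maximality: any j ≥ 0 with j(3j-1) ≤ 2n is ≤ K
theorem pent_max (n K j : Int) (hK0 : 0 ≤ K) (hKgt : 2 * n < (K + 1) * (3 * (K + 1) - 1))
    (hj : j * (3 * j - 1) ≤ 2 * n) : j ≤ K := by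
  by_contra h
  push Not at h
  have h1 : K + 1 ≤ j := by omega
  nlinarith [mul_nonneg (by omega : (0:Int) ≤ j - K - 1) (by omega : (0:Int) ≤ 3 * j + 3 * K + 2)]

-- A's binary search returns K under the standard invariant
theorem loopA_eq (K : Int) (hK0 : 0 ≤ K) :
    ∀ n low high ans, K * (3 * K - 1) ≤ 2 * n → 2 * n < (K + 1) * (3 * (K + 1) - 1) →
      0 ≤ low → 0 ≤ ans → ans ≤ K → (K < low → K ≤ ans) → (K ≤ high ∨ K < low) →
      loopA171 n low high ans = K := by
  intro n low high ans
  induction low, high, ans using loopA171.induct n with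
  | case1 low high ans hle hmid ih =>
    intro hKle hKgt hlow hans hansK hKlow hKhigh
    have h0 := (PySem.Int.floordiv_eq_iff_of_pos (a := low + high) (b := 2) (q := 0)
      (by norm_num)).mp hmid
    rw [loopA171, if_pos hle, if_pos hmid]
    exact ih hKle hKgt (by omega) hans hansK (by omega) (by omega)
  | case2 low high ans hle hmid hcond ih =>
    intro hKle hKgt hlow hans hansK hKlow hKhigh
    have hb := PySem.Int.floordiv_two_mid_bounds (lo := low) (hi := high) hle
    set mid := PySem.Int.floordiv (low + high) 2 with hm
    have hmle : mid * (3 * mid - 1) ≤ 2 * n := (pent_le_iff mid n).mp hcond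
    have hmidK : mid ≤ K := pent_max n K mid hK0 hKgt hmle
    rw [loopA171, if_pos hle, if_neg hmid, if_pos hcond]
    exact ih hKle hKgt (by omega) (by omega) hmidK (by omega) (by omega)
  | case3 low high ans hle hmid hcond ih =>
    intro hKle hKgt hlow hans hansK hKlow hKhigh
    have hb := PySem.Int.floordiv_two_mid_bounds (lo := low) (hi := high) hle
    set mid := PySem.Int.floordiv (low + high) 2 with hm
    have hmgt : ¬ mid * (3 * mid - 1) ≤ 2 * n := fun h => hcond ((pent_le_iff mid n).mpr h)
    -- K < mid : otherwise mid ≤ K gives mid(3mid-1) ≤ K(3K-1) ≤ 2n by monotonicity on [0,∞)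
    have hKmid : K < mid := by
      by_contra h
      push Not at h
      exact hmgt (by nlinarith [mul_nonneg (by omega : (0:Int) ≤ K - mid) (by omega : (0:Int) ≤ 3 * K + 3 * mid - 1)])
    rw [loopA171, if_pos hle, if_neg hmid, if_neg hcond]
    exact ih hKle hKgt hlow hans hansK hKlow (by omega)
  | case4 low high ans hle =>
    intro hKle hKgt hlow hans hansK hKlow hKhigh
    rw [loopA171, if_neg hle]
    omega

-- ===== VERDICT (by name: the statement is the Claim_ definition above) =====
theorem get_ans_p171_spec : Claim_equal_get_ans_p171 := by
  unfold Claim_equal_get_ans_p171 Spec_get_ans_p171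
  intro n hdom
  unfold Dom_get_ans_p171 pvDomInt at hdom
  have hn : -2147483648 ≤ n ∧ n ≤ 2147483648 := by simpa using hdom
  unfold get_ans_p171 get_ans_p171_alt
  by_cases h0 : n ≤ 0
  · rw [if_pos h0, if_pos h0]
  · rw [if_neg h0, if_neg h0]
    push Not at h0
    have hB := loopB_spec n 0 (by nlinarith)
    set K := loopB171 n 0 with hK
    have hK0 : (0:Int) ≤ K := hB.1
    -- K ≤ 10^9 from n ≤ 2^31: otherwise K(3K-1) > 2^32 ≥ 2n
    have hKcap : K ≤ 10 ^ 9 := by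
      by_contra h
      push Not at h
      have := hB.2.1
      nlinarith [mul_nonneg (by omega : (0:Int) ≤ K - 40001) (by omega : (0:Int) ≤ 3 * K + 120002)]
    exact loopA_eq K hK0 n 0 (10 ^ 9) 0 hB.2.1 hB.2.2 le_rfl le_rfl hK0 (by omega) (Or.inl hKcap)
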